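-- pv_equiv track=rewrite | github.com/ai-in-pm/NemoClawd | apps/NeMo-Agent-Toolkit-develop/packages/nvidia_nat_app/src/nat_app/graph/scheduling.py | _stage_order_with_entry_first
-- ===== SOURCE A (Python) =====
-- def _stage_order_with_entry_first(nodes: set[str], entry_point: str) -> list[str]:
--     lst = sorted(nodes)
--     if entry_point in nodes and lst:
--         try:
--             idx = lst.index(entry_point)
--             lst = [lst[idx]] + [n for i, n in enumerate(lst) if i != idx]
--         except ValueError:
--             pass
--     return lst
-- ===== SOURCE B (Python) =====
-- def _stage_order_with_entry_first(nodes: set[str], entry_point: str) -> list[str]: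
--     def before(a, b):
--         # total order in which entry_point is the least element, others lexicographic
--         if a == entry_point:
--             return True
--         if b == entry_point:
--             return False
--         return a < b
--
--     out = []
--     for n in nodes:
--         i = 0
--         while i < len(out) and before(out[i], n):
--             i += 1
--         out.insert(i, n)
--     return out
-- ===== Notes on version B (the rewrite author's own statement) =====
-- stated objective: alternative
-- what changed: Replaces library sort plus index-relocation of entry_point with a single-pass insertion sort under a custom total order that ranks entry_point as the least element, so no post-sort surgery is needed.
import Mathlib
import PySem

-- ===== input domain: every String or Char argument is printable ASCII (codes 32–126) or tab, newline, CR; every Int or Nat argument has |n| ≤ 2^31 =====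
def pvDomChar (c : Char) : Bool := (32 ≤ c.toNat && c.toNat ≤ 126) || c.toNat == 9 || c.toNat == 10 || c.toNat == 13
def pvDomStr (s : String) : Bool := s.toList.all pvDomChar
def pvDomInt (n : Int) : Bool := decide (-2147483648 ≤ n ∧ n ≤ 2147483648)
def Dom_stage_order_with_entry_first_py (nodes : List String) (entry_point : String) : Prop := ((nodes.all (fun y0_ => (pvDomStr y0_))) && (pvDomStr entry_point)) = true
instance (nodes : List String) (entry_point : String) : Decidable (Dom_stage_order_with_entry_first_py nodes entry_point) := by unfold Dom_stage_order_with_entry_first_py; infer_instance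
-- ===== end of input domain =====

-- B replaces A's library-sort-then-relocate with a one-pass insertion sort under a custom total order that ranks entry_point least: different algorithm, same result on duplicate-free lists.


-- ===== PORT A =====
-- lst = sorted(nodes); if entry_point in nodes and lst: idx = lst.index(entry_point);
-- lst = [lst[idx]] + [n for i, n in enumerate(lst) if i != idx]  (the except ValueError: pass arm is the 'none' branch)
def stage_order_with_entry_first_py (nodes : List String) (entry_point : String) : List String :=
  let lst := PySem.List.sorted nodes (fun n => n)
  if entry_point ∈ nodes ∧ lst ≠ [] then
    match PySem.List.index? lst entry_point with
    | some idx =>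
        (PySem.List.pyGet? lst (idx : Int)).toList ++
          (PySem.List.enumerate lst).filterMap
            (fun p => if p.1 ≠ (idx : Int) then some p.2 else none)
    | none => lst
  else lst

-- ===== PORT B =====
-- before(a, b): a == entry_point → True; b == entry_point → False; else a < b
def pvBefore (e a b : String) : Bool :=
  if a == e then true else if b == e then false else a < b

-- the inner while loop: advance i while before(out[i], n), then out.insert(i, n)
def pvInsert (e n : String) : List String → List String
  | [] => [n]
  | x :: xs => if pvBefore e x n then x :: pvInsert e n xs else n :: x :: xs

-- out = []; for n in nodes: insert n into out at the first position not 'before' it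
def stage_order_with_entry_first_py_alt (nodes : List String) (entry_point : String) : List String :=
  nodes.foldl (fun out n => pvInsert entry_point n out) []

-- ===== PRECONDITION & SPEC =====
-- nodes is a Python set, so its List String encoding holds distinct elements; Pre_ states exactly that
-- (on a duplicate-carrying list, which encodes no set, the two ports may disagree).
def Pre_stage_order_with_entry_first_py (nodes : List String) (entry_point : String) : Prop :=
  nodes.Nodup
instance (nodes : List String) (entry_point : String) : Decidable (Pre_stage_order_with_entry_first_py nodes entry_point) := by unfold Pre_stage_order_with_entry_first_py; infer_instance
def pvWitness_stage_order_with_entry_first_py : List String × String := (["b", "a", "c"], "b")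

def Spec_stage_order_with_entry_first_py (nodes : List String) (entry_point : String) (out : List String) : Prop := out = stage_order_with_entry_first_py_alt nodes entry_point
instance (nodes : List String) (entry_point : String) (out : List String) : Decidable (Spec_stage_order_with_entry_first_py nodes entry_point out) := by unfold Spec_stage_order_with_entry_first_py; infer_instance

-- ===== CLAIM (what is proved, stated in full; the proofs are below) =====
def Claim_equal_stage_order_with_entry_first_py : Prop := ∀ (nodes : List String) (entry_point : String), Dom_stage_order_with_entry_first_py nodes entry_point → Pre_stage_order_with_entry_first_py nodes entry_point → Spec_stage_order_with_entry_first_py nodes entry_point (stage_order_with_entry_first_py nodes entry_point)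

-- ===== LEMMAS AND PROOFS =====

-- pvBefore e is antisymmetric
theorem pvBefore_antisymm (e a b : String) (h1 : pvBefore e a b = true)
    (h2 : pvBefore e b a = true) : a = b := by
  unfold pvBefore at h1 h2
  by_cases ha : a = e
  · by_cases hb : b = e
    · rw [ha, hb]
    · simp [ha, hb] at h2
  · by_cases hb : b = e
    · simp [ha, hb] at h1
    · simp [ha, hb] at h1 h2
      exact absurd (lt_trans h1 h2) (lt_irrefl _)

-- pvBefore e is transitive
theorem pvBefore_trans (e a b c : String) (h1 : pvBefore e a b = true)
    (h2 : pvBefore e b c = true) : pvBefore e a c = true := by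
  unfold pvBefore at *
  by_cases ha : a = e
  · simp [ha]
  · by_cases hb : b = e
    · simp [ha, hb] at h1
    · by_cases hc : c = e
      · simp [hb, hc] at h2
      · simp [ha, hb, hc] at *
        exact lt_trans h1 h2

-- pvBefore e is total on distinct elements
theorem pvBefore_total (e a b : String) (hne : a ≠ b) (h : pvBefore e a b = false) :
    pvBefore e b a = true := by
  unfold pvBefore at *
  by_cases ha : a = e
  · simp [ha] at h
  · by_cases hb : b = e
    · simp [hb]
    · simp [ha, hb] at *
      rcases lt_or_eq_of_le h with h' | h'
      · exact h'
      · exact absurd (String.ext h'.symm) hne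

theorem pvInsert_perm (e n : String) (l : List String) :
    (pvInsert e n l).Perm (n :: l) := by
  induction l with
  | nil => simp [pvInsert]
  | cons x xs ih =>
      unfold pvInsert
      split_ifs
      · exact ((ih.cons x).trans (List.Perm.swap n x xs))
      · exact List.Perm.refl _

theorem pvInsert_pairwise (e n : String) (l : List String)
    (hpw : l.Pairwise (fun a b => pvBefore e a b = true))
    (hne : ∀ x ∈ l, x ≠ n) :
    (pvInsert e n l).Pairwise (fun a b => pvBefore e a b = true) := by
  induction l with
  | nil => simp [pvInsert]
  | cons x xs ih =>
      unfold pvInsert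
      rcases List.pairwise_cons.1 hpw with ⟨hx, hxs⟩
      split_ifs with hb
      · refine List.pairwise_cons.2 ⟨?_, ih hxs (fun y hy => hne y (List.mem_cons_of_mem _ hy))⟩
        intro y hy
        rcases List.mem_cons.1 (((pvInsert_perm e n xs).mem_iff).1 hy) with h | h
        · subst h; exact hb
        · exact hx y h
      · refine List.pairwise_cons.2 ⟨?_, hpw⟩
        intro y hy
        have hnx : pvBefore e n x = true :=
          pvBefore_total e x n (hne x (List.mem_cons_self)) (by simpa using hb)
        rcases List.mem_cons.1 hy with h | h
        · subst h; exact hnx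
        · exact pvBefore_trans e n x y hnx (hx y h)

theorem fold_insert_perm (e : String) (nodes acc : List String) :
    (nodes.foldl (fun out n => pvInsert e n out) acc).Perm (acc ++ nodes) := by
  induction nodes generalizing acc with
  | nil => simp
  | cons n ns ih =>
      simp only [List.foldl_cons]
      refine (ih (pvInsert e n acc)).trans ?_
      have h1 : (pvInsert e n acc ++ ns).Perm ((n :: acc) ++ ns) :=
        (pvInsert_perm e n acc).append_right ns
      refine h1.trans ?_
      simpa using (List.perm_middle (a := n) (l₁ := acc) (l₂ := ns)).symm

theorem fold_insert_pairwise (e : String) (nodes acc : List String)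
    (hpw : acc.Pairwise (fun a b => pvBefore e a b = true))
    (hnd : nodes.Nodup) (hdisj : ∀ x ∈ nodes, x ∉ acc) :
    (nodes.foldl (fun out n => pvInsert e n out) acc).Pairwise
      (fun a b => pvBefore e a b = true) := by
  induction nodes generalizing acc with
  | nil => simpa using hpw
  | cons n ns ih =>
      simp only [List.foldl_cons]
      rcases List.nodup_cons.1 hnd with ⟨hn, hns⟩
      refine ih (pvInsert e n acc) ?_ hns ?_
      · exact pvInsert_pairwise e n acc hpw
          (fun x hx h => hdisj n (List.mem_cons_self) (h ▸ hx))
      · intro x hx hmem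
        rcases List.mem_cons.1 (((pvInsert_perm e n acc).mem_iff).1 hmem) with h | h
        · exact hn (h ▸ hx)
        · exact hdisj x (List.mem_cons_of_mem _ hx) h

-- uniqueness of sorted permutations (antisymmetry passed as a hypothesis)
theorem eq_of_perm_pairwise (r : String → String → Prop)
    (hanti : ∀ a b, r a b → r b a → a = b) :
    ∀ (l1 l2 : List String), l1.Perm l2 → l1.Pairwise r → l2.Pairwise r → l1 = l2 := by
  intro l1
  induction l1 with
  | nil => intro l2 hp _ _; exact (hp.nil_eq).symm ▸ rfl
  | cons a t ih =>
      intro l2 hp h1 h2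
      cases l2 with
      | nil => exact absurd hp.symm (by simp)
      | cons b t2 =>
          rcases List.pairwise_cons.1 h1 with ⟨ha, ht⟩
          rcases List.pairwise_cons.1 h2 with ⟨hb, ht2⟩
          by_cases hab : a = b
          · subst hab
            have := ih t2 (hp.cons_inv) ht ht2
            rw [this]
          · have hain : a ∈ b :: t2 := hp.mem_iff.1 (List.mem_cons_self)
            have hbin : b ∈ a :: t := hp.symm.mem_iff.1 (List.mem_cons_self)
            have h1' : r a b := ha b (by rcases List.mem_cons.1 hbin with h | h; exact absurd h.symm hab; exact h)
            have h2' : r b a := hb a (by rcases List.mem_cons.1 hain with h | h; exact absurd h hab; exact h)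
            exact absurd (hanti a b h1' h2') hab

-- the comprehension keeps every element whose index differs from j
theorem filterMap_enumerate_keep_all (xs : List String) (s j : Int)
    (h : j < s ∨ s + xs.length ≤ j) :
    (PySem.List.enumerate xs s).filterMap
      (fun p => if p.1 ≠ j then some p.2 else none) = xs := by
  induction xs generalizing s with
  | nil => simp [PySem.List.enumerate_nil]
  | cons x xs ih =>
      rw [PySem.List.enumerate_cons]
      have hs : s ≠ j := by simp at h ⊢; omega
      simp only [List.filterMap_cons, if_pos hs]
      rw [ih (s + 1) (by simp at h ⊢; omega)]

theorem stage_order_with_entry_first_py_spec : Claim_equal_stage_order_with_entry_first_py := by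
  intro nodes entry _ hnd
  unfold Spec_stage_order_with_entry_first_py
  -- B's result: a permutation of nodes, pairwise sorted under pvBefore
  have hBperm : (stage_order_with_entry_first_py_alt nodes entry).Perm nodes := by
    unfold stage_order_with_entry_first_py_alt
    simpa using fold_insert_perm entry nodes []
  have hBpw : (stage_order_with_entry_first_py_alt nodes entry).Pairwise
      (fun a b => pvBefore entry a b = true) := by
    unfold stage_order_with_entry_first_py_alt
    exact fold_insert_pairwise entry nodes [] (by simp) hnd (by simp)
  -- A's result: same two properties
  unfold stage_order_with_entry_first_py
  set lst := PySem.List.sorted nodes (fun n => n) with hlst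
  have hperm : lst.Perm nodes := PySem.List.sorted_perm nodes (fun n => n) false
  have hnodup : lst.Nodup := (hperm.nodup_iff).2 hnd
  have hle : lst.Pairwise (fun a b : String => a ≤ b) :=
    PySem.List.sorted_pairwise nodes (fun n => n)
  have hlt : lst.Pairwise (fun a b : String => a < b) :=
    (List.Pairwise.and hle hnodup).imp (fun {a b} h => lt_of_le_of_ne h.1 h.2)
  by_cases hm : entry ∈ nodes
  · have hmem : entry ∈ lst := (hperm.mem_iff).2 hm
    have hne : lst ≠ [] := by intro h; rw [h] at hmem; exact (List.not_mem_nil) hmem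
    rw [if_pos ⟨hm, hne⟩]
    obtain ⟨idx, hk⟩ := Option.isSome_iff_exists.mp
      ((PySem.List.index?_isSome_iff lst entry).2 hmem)
    rw [hk]; dsimp only
    obtain ⟨pre, suf, hsplit, hlen, hnotpre⟩ :=
      (PySem.List.index?_eq_some_iff lst entry idx).1 hk
    have hnotsuf : entry ∉ suf := by
      rw [hsplit] at hnodup
      exact (List.nodup_cons.1 hnodup.of_append_right).1
    obtain ⟨hklt, hget, _⟩ := PySem.List.getElem_of_index?_eq_some hk
    have hpy : PySem.List.pyGet? lst (idx : Int) = some entry := by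
      rw [PySem.List.pyGet?_natCast]; simp [hklt, hget]
    rw [hpy]
    have hcompr : (PySem.List.enumerate lst).filterMap
        (fun p => if p.1 ≠ (idx : Int) then some p.2 else none) = pre ++ suf := by
      rw [hsplit, PySem.List.enumerate_append, PySem.List.enumerate_cons,
        List.filterMap_append, List.filterMap_cons]
      have h0 : ((0 : Int) + pre.length) = (idx : Int) := by simp [hlen]
      rw [h0]
      simp only [ne_eq, not_true_eq_false, if_false]
      rw [filterMap_enumerate_keep_all pre 0 (idx : Int) (by right; simp [hlen]),
        filterMap_enumerate_keep_all suf ((idx : Int) + 1) (idx : Int) (by left; omega)]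
    rw [hcompr]
    -- A's value is entry :: (pre ++ suf); show it is pairwise-pvBefore and perm to nodes
    have hAperm : (entry :: (pre ++ suf)).Perm nodes := by
      refine (List.perm_middle).symm.trans ?_
      rw [← hsplit]; exact hperm
    have hsub : (pre ++ suf).Sublist lst := by
      rw [hsplit]; exact (List.sublist_cons_self entry suf).append_left pre
    have hrestne : ∀ x ∈ pre ++ suf, x ≠ entry := by
      intro x hx h
      rcases List.mem_append.1 hx with h' | h'
      · exact hnotpre (h ▸ h')
      · exact hnotsuf (h ▸ h')
    have hApw : (entry :: (pre ++ suf)).Pairwise (fun a b => pvBefore entry a b = true) := by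
      refine List.pairwise_cons.2 ⟨fun y _ => by simp [pvBefore], ?_⟩
      refine List.Pairwise.imp_of_mem ?_ (hlt.sublist hsub)
      intro a b hma hmb hab
      have hbne : b ≠ entry := hrestne b hmb
      have hane : a ≠ entry := hrestne a hma
      simp [pvBefore, hane, hbne, hab]
    exact eq_of_perm_pairwise _ (pvBefore_antisymm entry) _ _
      (hAperm.trans hBperm.symm) hApw hBpw
  · rw [if_neg (by intro h; exact hm h.1)]
    have hApw : lst.Pairwise (fun a b => pvBefore entry a b = true) := by
      refine List.Pairwise.imp_of_mem ?_ hlt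
      intro a b hma hmb hab
      have hane : a ≠ entry := fun h => hm (h ▸ (hperm.mem_iff).1 hma)
      have hbne : b ≠ entry := fun h => hm (h ▸ (hperm.mem_iff).1 hmb)
      simp [pvBefore, hane, hbne, hab]
    exact eq_of_perm_pairwise _ (pvBefore_antisymm entry) _ _
      (hperm.trans hBperm.symm) hApw hBpw

-- ===== VERDICT (by name: the statement is the Claim_ definition above) =====
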